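-- pv_equiv track=rewrite | github.com/LordZorgoth/transitive-closure | transitive_closure.py | is_transitive
-- ===== SOURCE A (Python) =====
-- def is_transitive(E, N):
--     """This function tests whether E is transitive."""
--     X = {node: set() for node in N}
--     Y = {node: set() for node in N}
--     for edge in E:
--         X[edge[1]].add(edge[0])
--         Y[edge[0]].add(edge[1])
--     for node in N:
--         for x in X[node]:
--             for y in Y[node]:
--                 if x not in X[y]:
--                     return False
--     return True
-- ===== SOURCE B (Python) =====
-- def is_transitive(E, N):
--     """Edge-centric check: E is transitive iff for every edge a->b, succ(b) <= succ(a)."""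
--     succ = {node: set() for node in N}
--     for edge in E:
--         succ[edge[0]].add(edge[1])
--     return all([succ[edge[1]] <= succ[edge[0]] for edge in E])
-- ===== Notes on version B (the rewrite author's own statement) =====
-- stated objective: simpler
-- what changed: Replaces A's two maps (predecessors and successors) and node-centric triple-nested scan by a single successor map and a per-edge subset test succ(b) <= succ(a).
import Mathlib
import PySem

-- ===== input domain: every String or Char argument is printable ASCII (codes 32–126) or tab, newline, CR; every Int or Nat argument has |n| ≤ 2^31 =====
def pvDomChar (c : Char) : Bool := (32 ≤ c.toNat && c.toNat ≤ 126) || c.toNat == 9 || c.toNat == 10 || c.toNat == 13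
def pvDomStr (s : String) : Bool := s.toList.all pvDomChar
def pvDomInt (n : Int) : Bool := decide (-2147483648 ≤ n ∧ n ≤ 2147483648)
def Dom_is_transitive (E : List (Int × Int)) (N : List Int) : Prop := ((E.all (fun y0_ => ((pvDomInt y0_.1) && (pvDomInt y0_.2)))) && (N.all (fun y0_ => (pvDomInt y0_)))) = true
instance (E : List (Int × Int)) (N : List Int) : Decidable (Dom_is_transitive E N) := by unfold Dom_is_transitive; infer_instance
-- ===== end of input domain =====

-- B replaces A's predecessor+successor maps and node-centric triple-nested scan by a single
-- successor map and a per-edge subset test (simpler decomposition, same exact result).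

-- ===== PORT A =====
-- X[k].add(v) / Y[k].add(v): Dict.modify with default ∅; under Pre_ the key is always present
-- (Python raises KeyError otherwise), so the default is never used on admitted inputs.
def is_transitive (E : List (Int × Int)) (N : List Int) : Bool :=
  let X0 : PySem.Dict Int (PySem.Set Int) :=
    N.foldl (fun d node => d.insert node PySem.Set.empty) PySem.Dict.empty
  let Y0 : PySem.Dict Int (PySem.Set Int) :=
    N.foldl (fun d node => d.insert node PySem.Set.empty) PySem.Dict.empty
  let XY := E.foldl
    (fun (p : PySem.Dict Int (PySem.Set Int) × PySem.Dict Int (PySem.Set Int)) edge =>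
      (p.1.modify edge.2 PySem.Set.empty (fun s => s.add edge.1),
       p.2.modify edge.1 PySem.Set.empty (fun s => s.add edge.2)))
    (X0, Y0)
  let X := XY.1
  let Y := XY.2
  -- the early 'return False' over set-iteration is order-independent for the Bool result: 'all'
  N.all (fun node =>
    (X.getD node PySem.Set.empty).all (fun x =>
      (Y.getD node PySem.Set.empty).all (fun y =>
        (X.getD y PySem.Set.empty).contains x)))

-- ===== PORT B =====
def is_transitive_alt (E : List (Int × Int)) (N : List Int) : Bool :=
  let succ0 : PySem.Dict Int (PySem.Set Int) :=
    N.foldl (fun d node => d.insert node PySem.Set.empty) PySem.Dict.empty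
  let succ := E.foldl (fun d edge => d.modify edge.1 PySem.Set.empty (fun s => s.add edge.2)) succ0
  (E.map (fun edge =>
    PySem.Set.issubset (succ.getD edge.2 PySem.Set.empty) (succ.getD edge.1 PySem.Set.empty))).all id

-- ===== PRECONDITION & SPEC =====
-- Pre_ excludes exactly the inputs where A raises KeyError: an edge endpoint not in N
-- (B raises there too).
def Pre_is_transitive (E : List (Int × Int)) (N : List Int) : Prop :=
  ∀ e ∈ E, e.1 ∈ N ∧ e.2 ∈ N
instance (E : List (Int × Int)) (N : List Int) : Decidable (Pre_is_transitive E N) := by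
  unfold Pre_is_transitive; infer_instance
def pvWitness_is_transitive : (List (Int × Int)) × List Int := ([(1, 2), (2, 3), (1, 3)], [1, 2, 3])
def Spec_is_transitive (E : List (Int × Int)) (N : List Int) (out : Bool) : Prop := out = is_transitive_alt E N
instance (E : List (Int × Int)) (N : List Int) (out : Bool) : Decidable (Spec_is_transitive E N out) := by unfold Spec_is_transitive; infer_instance

-- ===== CLAIM (what is proved, stated in full; the proofs are below) =====
def Claim_equal_is_transitive : Prop := ∀ (E : List (Int × Int)) (N : List Int), Dom_is_transitive E N → Pre_is_transitive E N → Spec_is_transitive E N (is_transitive E N)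

-- ===== LEMMAS AND PROOFS =====

-- the initial dict {node: set() for node in N} has every value ∅, so every getD is ∅
theorem getD_init_empty (N : List Int) (k : Int) :
    ((N.foldl (fun d node => d.insert node (PySem.Set.empty : PySem.Set Int)) PySem.Dict.empty).getD
      k PySem.Set.empty) = PySem.Set.empty := by
  suffices h : ∀ (d : PySem.Dict Int (PySem.Set Int)),
      (∀ j, d.getD j PySem.Set.empty = PySem.Set.empty) →
      ∀ j, ((N.foldl (fun d node => d.insert node PySem.Set.empty) d).getD j PySem.Set.empty)
        = PySem.Set.empty by
    exact h _ (fun j => by simp [PySem.Dict.getD_empty]) k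
  induction N with
  | nil => intro d hd j; simpa using hd j
  | cons n t ih =>
    intro d hd j
    simp only [List.foldl_cons]
    refine ih _ (fun j => ?_) j
    rw [PySem.Dict.getD_insert]
    split
    · rfl
    · exact hd j

-- membership in the successor-map fold: y ∈ succ(k) ↔ some edge (k, y) was seen
theorem mem_getD_succ_fold (E : List (Int × Int)) (d : PySem.Dict Int (PySem.Set Int))
    (k y : Int) :
    (y ∈ (E.foldl (fun d edge => d.modify edge.1 PySem.Set.empty (fun s => s.add edge.2)) d).getD
        k PySem.Set.empty)
      ↔ y ∈ d.getD k PySem.Set.empty ∨ (k, y) ∈ E := by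
  induction E generalizing d with
  | nil => simp
  | cons e t ih =>
    rcases e with ⟨a, b⟩
    simp only [List.foldl_cons, ih, PySem.Dict.getD_modify, List.mem_cons, Prod.mk.injEq]
    by_cases hk : k = a
    · subst hk
      simp [PySem.Set.mem_add]
      tauto
    · simp only [if_neg hk]
      constructor
      · rintro (h | h)
        · exact Or.inl h
        · exact Or.inr (Or.inr h)
      · rintro (h | ⟨hka, _⟩ | h)
        · exact Or.inl h
        · exact absurd hka hk
        · exact Or.inr h

-- same fold with the two edge components swapped: the predecessor map
theorem mem_getD_pred_fold (E : List (Int × Int)) (d : PySem.Dict Int (PySem.Set Int))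
    (k x : Int) :
    (x ∈ (E.foldl (fun d edge => d.modify edge.2 PySem.Set.empty (fun s => s.add edge.1)) d).getD
        k PySem.Set.empty)
      ↔ x ∈ d.getD k PySem.Set.empty ∨ (x, k) ∈ E := by
  induction E generalizing d with
  | nil => simp
  | cons e t ih =>
    rcases e with ⟨a, b⟩
    simp only [List.foldl_cons, ih, PySem.Dict.getD_modify, List.mem_cons, Prod.mk.injEq]
    by_cases hk : k = b
    · subst hk
      simp [PySem.Set.mem_add]
      tauto
    · simp only [if_neg hk]
      constructor
      · rintro (h | h)
        · exact Or.inl h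
        · exact Or.inr (Or.inr h)
      · rintro (h | ⟨_, hkb⟩ | h)
        · exact Or.inl h
        · exact absurd hkb hk
        · exact Or.inr h

theorem is_transitive_iff (E : List (Int × Int)) (N : List Int) :
    is_transitive E N = true ↔
      ∀ m ∈ N, ∀ x y : Int, (x, m) ∈ E → (m, y) ∈ E → (x, y) ∈ E := by
  unfold is_transitive
  simp only []
  rw [PySem.List.foldl_prod_mk
    (f := fun d (edge : Int × Int) => PySem.Dict.modify d edge.2 PySem.Set.empty (fun s => s.add edge.1))
    (g := fun d (edge : Int × Int) => PySem.Dict.modify d edge.1 PySem.Set.empty (fun s => s.add edge.2))]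
  simp only [List.all_eq_true]
  constructor
  · intro h m hm x y hx hy
    have := h m hm x (by rw [mem_getD_pred_fold, getD_init_empty]; exact Or.inr hx)
      y (by rw [mem_getD_succ_fold, getD_init_empty]; exact Or.inr hy)
    rw [PySem.Set.contains_iff, mem_getD_pred_fold, getD_init_empty] at this
    rcases this with h | h
    · exact absurd h (List.not_mem_nil)
    · exact h
  · intro h m hm x hx y hy
    rw [mem_getD_pred_fold, getD_init_empty] at hx
    rw [mem_getD_succ_fold, getD_init_empty] at hy
    rw [PySem.Set.contains_iff, mem_getD_pred_fold, getD_init_empty]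
    rcases hx with hx | hx
    · exact absurd hx (List.not_mem_nil)
    rcases hy with hy | hy
    · exact absurd hy (List.not_mem_nil)
    exact Or.inr (h m hm x y hx hy)

theorem is_transitive_alt_iff (E : List (Int × Int)) (N : List Int) :
    is_transitive_alt E N = true ↔
      ∀ e ∈ E, ∀ y : Int, (e.2, y) ∈ E → (e.1, y) ∈ E := by
  unfold is_transitive_alt
  simp only [List.all_eq_true, List.mem_map, id, forall_exists_index, and_imp,
    forall_apply_eq_imp_iff₂]
  constructor
  · intro h e he y hy
    have := (PySem.Set.issubset_iff _ _).1 (h e he) y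
      (by rw [mem_getD_succ_fold, getD_init_empty]; exact Or.inr hy)
    rw [mem_getD_succ_fold, getD_init_empty] at this
    rcases this with h' | h'
    · exact absurd h' (List.not_mem_nil)
    · exact h'
  · intro h e he
    rw [PySem.Set.issubset_iff]
    intro y hy
    rw [mem_getD_succ_fold, getD_init_empty] at hy
    rw [mem_getD_succ_fold, getD_init_empty]
    rcases hy with hy | hy
    · exact absurd hy (List.not_mem_nil)
    · exact Or.inr (h e he y hy)

-- ===== VERDICT (by name: the statement is the Claim_ definition above) =====
theorem is_transitive_spec : Claim_equal_is_transitive := by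
  intro E N _ hpre
  unfold Spec_is_transitive
  rcases hA : is_transitive E N with _ | _
  · rcases hB : is_transitive_alt E N with _ | _
    · rfl
    · exfalso
      have hb := (is_transitive_alt_iff E N).1 hB
      have : is_transitive E N = true := by
        rw [is_transitive_iff]
        intro m _ x y hx hy
        exact hb (x, m) hx y hy
      simp [hA] at this
  · have ha := (is_transitive_iff E N).1 hA
    have : is_transitive_alt E N = true := by
      rw [is_transitive_alt_iff]
      intro e he y hy
      exact ha e.2 ((hpre e he).2) e.1 y (by simpa using he) hy
    simp [this]
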